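-- pv_equiv track=rewrite | github.com/jina-ai/benchmark | scripts/site_generator.py | _get_table_header
-- ===== SOURCE A (Python) =====
-- from typing import Any, Dict, List, Tuple, Union, Optional
--
-- def _get_table_header(raw_data: List[Dict[str, Any]]) -> Tuple[str, str]:
--     """Return metadata table title and table separator."""
--     titles = {}
--     for test_run in raw_data:
--         for name in test_run['metadata']:
--             titles[name] = []
--         break
--     separators = []
--     for result in raw_data:
--         separators.append('---:')
--         for field in titles:
--             if 'metadata' in result:
--                 value = result['metadata'].get(field, 'N/A')
--                 titles[field].append(f'**{value}**')
--
--             else: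
--                 titles[field].append('**N/A**')
--     final = []
--     for title, values in titles.items():
--         final.append(f'| **{title}** | {" | ".join(values)} |\n')
--     header = f'{final[0]}| :---: | {" | ".join(separators)} |\n{"".join(final[1:])}'
--     return header
-- ===== SOURCE B (Python) =====
-- from typing import Any, Dict, List, Tuple, Union, Optional
--
-- def _get_table_header(raw_data: List[Dict[str, Any]]) -> Tuple[str, str]:
--     """Return metadata table title and table separator."""
--     fields = list(raw_data[0]['metadata'])
--
--     def row(field):
--         cells = ('**{}**'.format(r['metadata'].get(field, 'N/A')) if 'metadata' in r
--                  else '**N/A**' for r in raw_data)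
--         return '| **{}** | {} |\n'.format(field, ' | '.join(cells))
--
--     separator_line = '| :---: | {} |\n'.format(' | '.join('---:' for _ in raw_data))
--     return row(fields[0]) + separator_line + ''.join(row(f) for f in fields[1:])
-- ===== Notes on version B (the rewrite author's own statement) =====
-- stated objective: simpler
-- what changed: A loops over runs mutating a dict of per-field accumulator lists and assembles rows from it afterwards; B fixes the field list from the first run and emits each table row directly with a field-outer/run-inner loop (loop interchange), eliminating the accumulator dict.
import Mathlib
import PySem

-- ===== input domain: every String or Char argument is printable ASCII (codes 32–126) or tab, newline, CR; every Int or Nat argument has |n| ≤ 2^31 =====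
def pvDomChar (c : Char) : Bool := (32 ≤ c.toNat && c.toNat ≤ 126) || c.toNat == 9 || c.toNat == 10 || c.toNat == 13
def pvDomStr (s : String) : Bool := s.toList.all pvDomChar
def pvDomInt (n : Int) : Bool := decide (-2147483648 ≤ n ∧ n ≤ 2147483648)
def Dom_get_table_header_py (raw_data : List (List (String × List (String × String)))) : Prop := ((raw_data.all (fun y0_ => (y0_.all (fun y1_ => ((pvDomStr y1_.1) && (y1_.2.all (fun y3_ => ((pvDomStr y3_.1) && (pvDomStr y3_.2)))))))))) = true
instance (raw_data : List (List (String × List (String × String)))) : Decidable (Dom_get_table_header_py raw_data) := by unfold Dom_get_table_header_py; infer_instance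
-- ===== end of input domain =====

-- B replaces A's run-outer loop that mutates a dict of per-field accumulator lists by a
-- field-outer loop that emits each table row directly (loop interchange, no accumulator dict);
-- same cost, simpler structure.

-- ===== PORT A =====
def get_table_header_py (raw_data : List (List (String × List (String × String)))) : String :=
  -- titles = {}; for test_run in raw_data: for name in test_run['metadata']: titles[name] = []; break
  let titles : PySem.Dict String (List String) :=
    match raw_data with
    | [] => PySem.Dict.empty
    | test_run :: _ =>
      match (PySem.Dict.ofList test_run).get? "metadata" with
      | none => PySem.Dict.empty   -- Python raises KeyError here; excluded by Pre_
      | some md =>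
        (PySem.Dict.ofList md).keys.foldl
          (fun d name => d.insert name ([] : List String)) PySem.Dict.empty
  -- separators = []; for result in raw_data: separators.append('---:'); for field in titles: …
  let st : List String × PySem.Dict String (List String) :=
    raw_data.foldl
      (fun st result =>
        let seps := st.1 ++ ["---:"]
        let t := st.2.keys.foldl
          (fun t field =>
            match (PySem.Dict.ofList result).get? "metadata" with
            | some md =>
              t.modify field [] (fun v => v ++ ["**" ++ (PySem.Dict.ofList md).getD field "N/A" ++ "**"])
            | none =>
              t.modify field [] (fun v => v ++ ["**N/A**"]))
          st.2
        (seps, t))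
      ([], titles)
  -- final = [f'| **{title}** | {" | ".join(values)} |\n' for title, values in titles.items()]
  let final : List String :=
    st.2.items.map (fun tv => "| **" ++ tv.1 ++ "** | " ++ PySem.Str.join " | " tv.2 ++ " |\n")
  match final with
  | [] => ""   -- Python raises IndexError (final[0]); excluded by Pre_
  | f0 :: rest =>
    f0 ++ "| :---: | " ++ PySem.Str.join " | " st.1 ++ " |\n" ++ PySem.Str.join "" rest

-- ===== PORT B =====
def get_table_header_py_alt (raw_data : List (List (String × List (String × String)))) : String :=
  -- fields = list(raw_data[0]['metadata'])
  let fields : List String :=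
    match raw_data with
    | [] => []   -- Python raises IndexError (raw_data[0]); excluded by Pre_
    | r :: _ =>
      match (PySem.Dict.ofList r).get? "metadata" with
      | none => []   -- Python raises KeyError; excluded by Pre_
      | some md => (PySem.Dict.ofList md).keys
  -- def row(field): one table row, scanning the runs for this one field
  let row : String → String := fun field =>
    "| **" ++ field ++ "** | " ++
      PySem.Str.join " | "
        (raw_data.map (fun r =>
          match (PySem.Dict.ofList r).get? "metadata" with
          | some md => "**" ++ (PySem.Dict.ofList md).getD field "N/A" ++ "**"
          | none => "**N/A**")) ++ " |\n"
  let separator_line : String :=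
    "| :---: | " ++ PySem.Str.join " | " (raw_data.map (fun _ => "---:")) ++ " |\n"
  match fields with
  | [] => ""   -- Python raises IndexError (fields[0]); excluded by Pre_
  | f0 :: rest => row f0 ++ separator_line ++ PySem.Str.join "" (rest.map row)

-- ===== PRECONDITION & SPEC =====
-- Pre_ excludes exactly the inputs on which A raises: empty raw_data or a first run without a
-- 'metadata' key (KeyError/IndexError), or a first run whose metadata dict is empty (final[0]
-- raises IndexError).  B raises on exactly the same inputs.
def Pre_get_table_header_py (raw_data : List (List (String × List (String × String)))) : Prop :=
  ((PySem.Dict.ofList (raw_data.headD [])).get? "metadata").getD [] ≠ []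

instance (raw_data : List (List (String × List (String × String)))) : Decidable (Pre_get_table_header_py raw_data) := by unfold Pre_get_table_header_py; infer_instance

def pvWitness_get_table_header_py : (List (List (String × List (String × String)))) :=
  [[("metadata", [("a", "1")])]]

def Spec_get_table_header_py (raw_data : List (List (String × List (String × String)))) (out : String) : Prop := out = get_table_header_py_alt raw_data
instance (raw_data : List (List (String × List (String × String)))) (out : String) : Decidable (Spec_get_table_header_py raw_data out) := by unfold Spec_get_table_header_py; infer_instance

-- ===== CLAIM (what is proved, stated in full; the proofs are below) =====
def Claim_equal_get_table_header_py : Prop := ∀ (raw_data : List (List (String × List (String × String)))), Dom_get_table_header_py raw_data → Pre_get_table_header_py raw_data → Spec_get_table_header_py raw_data (get_table_header_py raw_data)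

-- ===== LEMMAS AND PROOFS =====

-- the cell text A appends for run r at column `field` = the cell text B computes there
def pvCell (r : List (String × List (String × String))) (field : String) : String :=
  match (PySem.Dict.ofList r).get? "metadata" with
  | some md => "**" ++ (PySem.Dict.ofList md).getD field "N/A" ++ "**"
  | none => "**N/A**"

-- A's inner loop body is `modify field [] (· ++ [pvCell r field])` regardless of the branch taken
lemma pvInnerBody (r : List (String × List (String × String))) :
    (fun (t : PySem.Dict String (List String)) (field : String) =>
      match (PySem.Dict.ofList r).get? "metadata" with
      | some md =>
        t.modify field [] (fun v => v ++ ["**" ++ (PySem.Dict.ofList md).getD field "N/A" ++ "**"])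
      | none => t.modify field [] (fun v => v ++ ["**N/A**"]))
    = fun t field => t.modify field [] (fun v => v ++ [pvCell r field]) := by
  funext t field
  unfold pvCell
  cases (PySem.Dict.ofList r).get? "metadata" <;> rfl

-- folding `modify k [] (· ++ [c k])` over a Nodup key list appends once at each visited key
lemma pvFoldModifyGetD (ks : List String) (c : String → String)
    (t : PySem.Dict String (List String)) (hnd : ks.Nodup) (f : String) :
    (ks.foldl (fun t k => t.modify k [] (fun v => v ++ [c k])) t).getD f []
      = if f ∈ ks then t.getD f [] ++ [c f] else t.getD f [] := by
  induction ks generalizing t with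
  | nil => simp
  | cons k ks ih =>
    rcases List.nodup_cons.mp hnd with ⟨hk, hnd'⟩
    simp only [List.foldl_cons, ih _ hnd', List.mem_cons]
    by_cases hfk : f = k
    · subst hfk
      simp [hk, PySem.Dict.getD_modify_self]
    · simp [hfk, PySem.Dict.getD_modify]

-- keys are unchanged by A's inner loop when it runs over the dict's own keys
lemma pvFoldModifyKeys (c : String → String) (t : PySem.Dict String (List String)) :
    (t.keys.foldl (fun t k => t.modify k [] (fun v => v ++ [c k])) t).keys = t.keys := by
  rw [PySem.Dict.keys_foldl_modify]
  rw [PySem.Set.update_eq_append_filter]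
  have hnil : (PySem.Set.ofList t.keys).filter (fun y => !(PySem.Set.contains t.keys y)) = [] := by
    apply List.filter_eq_nil_iff.mpr
    intro x hx
    have hxk : x ∈ t.keys := (PySem.Set.mem_ofList _ _).mp hx
    simp [PySem.Set.contains, hxk]
  rw [hnil, List.append_nil]

-- A's outer loop: separators gain one '---:' per run; each column accumulates its cells in order
lemma pvOuterLoop (runs : List (List (String × List (String × String))))
    (seps : List String) (t : PySem.Dict String (List String)) (hnd : t.keys.Nodup) :
    (runs.foldl
      (fun (st : List String × PySem.Dict String (List String)) result =>
        let seps := st.1 ++ ["---:"]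
        let t := st.2.keys.foldl
          (fun t field =>
            match (PySem.Dict.ofList result).get? "metadata" with
            | some md =>
              t.modify field [] (fun v => v ++ ["**" ++ (PySem.Dict.ofList md).getD field "N/A" ++ "**"])
            | none =>
              t.modify field [] (fun v => v ++ ["**N/A**"]))
          st.2
        (seps, t))
      (seps, t)).1 = seps ++ runs.map (fun _ => "---:")
    ∧ (runs.foldl
      (fun (st : List String × PySem.Dict String (List String)) result =>
        let seps := st.1 ++ ["---:"]
        let t := st.2.keys.foldl
          (fun t field =>
            match (PySem.Dict.ofList result).get? "metadata" with
            | some md =>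
              t.modify field [] (fun v => v ++ ["**" ++ (PySem.Dict.ofList md).getD field "N/A" ++ "**"])
            | none =>
              t.modify field [] (fun v => v ++ ["**N/A**"]))
          st.2
        (seps, t))
      (seps, t)).2.keys = t.keys
    ∧ ∀ f ∈ t.keys,
      (runs.foldl
        (fun (st : List String × PySem.Dict String (List String)) result =>
          let seps := st.1 ++ ["---:"]
          let t := st.2.keys.foldl
            (fun t field =>
              match (PySem.Dict.ofList result).get? "metadata" with
              | some md =>
                t.modify field [] (fun v => v ++ ["**" ++ (PySem.Dict.ofList md).getD field "N/A" ++ "**"])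
              | none =>
                t.modify field [] (fun v => v ++ ["**N/A**"]))
            st.2
          (seps, t))
        (seps, t)).2.getD f [] = t.getD f [] ++ runs.map (fun r => pvCell r f) := by
  induction runs generalizing seps t with
  | nil => simp
  | cons r runs ih =>
    have hstep :
        (t.keys.foldl
          (fun t field =>
            match (PySem.Dict.ofList r).get? "metadata" with
            | some md =>
              t.modify field [] (fun v => v ++ ["**" ++ (PySem.Dict.ofList md).getD field "N/A" ++ "**"])
            | none =>
              t.modify field [] (fun v => v ++ ["**N/A**"]))
          t)
        = t.keys.foldl (fun t k => t.modify k [] (fun v => v ++ [pvCell r k])) t := by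
      rw [pvInnerBody r]
    have hkeys1 := pvFoldModifyKeys (pvCell r) t
    have hnd1 : (t.keys.foldl (fun t k => t.modify k [] (fun v => v ++ [pvCell r k])) t).keys.Nodup := by
      rw [hkeys1]; exact hnd
    obtain ⟨h1, h2, h3⟩ := ih (seps ++ ["---:"])
      (t.keys.foldl (fun t k => t.modify k [] (fun v => v ++ [pvCell r k])) t) hnd1
    refine ⟨?_, ?_, ?_⟩
    · simpa [hstep] using h1
    · simp only [List.foldl_cons, hstep]
      rw [h2, hkeys1]
    · intro f hf
      simp only [List.foldl_cons, hstep]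
      rw [h3 f (by rw [hkeys1]; exact hf)]
      rw [pvFoldModifyGetD t.keys (pvCell r) t hnd f]
      simp [hf]

lemma pvKeysOfList (l : List (String × String)) :
    (PySem.Dict.ofList l).keys = PySem.Set.ofList (l.map Prod.fst) := by
  have := PySem.Dict.keys_foldl_insert_key l Prod.fst (fun _ x => x.2)
    (PySem.Dict.empty (κ := String) (ν := String))
  simp only [PySem.Dict.ofList, PySem.Dict.update]
  simpa [PySem.Set.update_nil_left] using this

-- ===== VERDICT =====
theorem get_table_header_py_spec : Claim_equal_get_table_header_py := by
  intro raw_data _hdom hpre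
  unfold Spec_get_table_header_py
  unfold Pre_get_table_header_py at hpre
  rcases raw_data with _ | ⟨r0, rest_runs⟩
  · simp [PySem.Dict.ofList, PySem.Dict.update] at hpre
  simp only [List.headD_cons] at hpre
  rcases hmd : (PySem.Dict.ofList r0).get? "metadata" with _ | md
  · rw [hmd] at hpre; simp at hpre
  rw [hmd] at hpre
  simp only [Option.getD_some, ne_eq] at hpre
  -- titles0: one empty accumulator per field of the first run's metadata
  set fields : List String := (PySem.Dict.ofList md).keys with hfields
  have hndf : fields.Nodup := PySem.Dict.nodup_keys_ofList md
  have htitles0 :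
      (fields.foldl (fun d name => d.insert name ([] : List String)) PySem.Dict.empty).items
        = fields.map (fun f => (f, ([] : List String))) := by
    simpa using PySem.Dict.items_foldl_insert_fresh fields (fun a => a)
      (fun _ => ([] : List String)) PySem.Dict.empty (by simp) (by simpa using hndf)
  set titles0 := fields.foldl (fun d name => d.insert name ([] : List String)) PySem.Dict.empty
    with htitles0def
  have hkeys0 : titles0.keys = fields := by
    simp only [PySem.Dict.keys, htitles0, List.map_map]
    simp [Function.comp_def]
  have hgetD0 : ∀ f ∈ fields, titles0.getD f [] = [] := by
    intro f hf
    apply PySem.Dict.getD_of_mem_items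
    · rw [htitles0]; exact List.mem_map.mpr ⟨f, hf, rfl⟩
    · rw [hkeys0]; exact hndf
  obtain ⟨hsep, hkeys, hgetD⟩ :=
    pvOuterLoop (r0 :: rest_runs) [] titles0 (by rw [hkeys0]; exact hndf)
  -- evaluate A
  unfold get_table_header_py get_table_header_py_alt
  simp only [hmd]
  rw [← hfields, ← htitles0def]
  set st := (r0 :: rest_runs).foldl
      (fun (st : List String × PySem.Dict String (List String)) result =>
        let seps := st.1 ++ ["---:"]
        let t := st.2.keys.foldl
          (fun t field =>
            match (PySem.Dict.ofList result).get? "metadata" with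
            | some md =>
              t.modify field [] (fun v => v ++ ["**" ++ (PySem.Dict.ofList md).getD field "N/A" ++ "**"])
            | none =>
              t.modify field [] (fun v => v ++ ["**N/A**"]))
          st.2
        (seps, t))
      ([], titles0) with hst
  have hitems : st.2.items = fields.map (fun f => (f, ((r0 :: rest_runs).map (fun r => pvCell r f)))) := by
    rw [PySem.Dict.items_eq_map_keys st.2 (by rw [hkeys, hkeys0]; exact hndf) ([] : List String)]
    rw [hkeys, hkeys0]
    apply List.map_congr_left
    intro f hf
    rw [hgetD f (by rw [hkeys0]; exact hf), hgetD0 f hf]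
    simp
  rcases hfe : fields with _ | ⟨f0, fs⟩
  · -- impossible: md ≠ [] but its key list is empty
    exfalso
    rcases md with _ | ⟨p, l⟩
    · exact hpre rfl
    · rw [hfields, pvKeysOfList] at hfe
      have : p.1 ∈ PySem.Set.ofList ((p :: l).map Prod.fst) :=
        (PySem.Set.mem_ofList _ _).mpr (by simp)
      rw [hfe] at this
      exact absurd this (List.not_mem_nil)
  · rw [hitems, hfe, hsep]
    simp only [List.map_cons, List.nil_append, pvCell, List.map_map, Function.comp_def]
    simp only [String.append_assoc]
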